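-- pv_equiv track=rewrite | github.com/Redna/talos | cortex/s_sovereign_controller.py | _apply_foresight
-- ===== SOURCE A (Python) =====
-- from typing import Dict, Any, List, Optional
--
-- def _apply_foresight(predictions: List[Dict[str, Any]]) -> List[Dict[str, Any]]:
--     """
--     Sovereign Foresight: Maps predictive insights to corrective interventions.
--     """
--     actions = []
--     for pred in predictions:
--         p_type = pred.get("type")
--         severity = pred.get("severity", "LOW")
--
--         if p_type == "COGNITIVE_OVERLOAD":
--             actions.append({
--                 "action": "MEMORY_VACUUM",
--                 "priority": "HIGH" if severity == "HIGH" else "MEDIUM",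
--                 "rationale": pred.get("rationale")
--             })
--         elif p_type == "STABILITY_DRIFT":
--             actions.append({
--                 "action": "FORCE_SENTINEL_UPGRADE",
--                 "priority": "HIGH",
--                 "rationale": pred.get("rationale")
--             })
--         elif p_type == "METABOLIC_DECAY":
--             actions.append({
--                 "action": "METABOLIC_RECALIBRATION",
--                 "priority": "MEDIUM",
--                 "rationale": pred.get("rationale")
--             })
--
--     return actions
-- ===== SOURCE B (Python) =====
-- from typing import Dict, Any, List, Optional
--
-- _ACTION_OF = {
--     "COGNITIVE_OVERLOAD": "MEMORY_VACUUM",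
--     "STABILITY_DRIFT": "FORCE_SENTINEL_UPGRADE",
--     "METABOLIC_DECAY": "METABOLIC_RECALIBRATION",
-- }
--
-- def _priority(pred: Dict[str, Any]) -> str:
--     t = pred.get("type")
--     if t == "STABILITY_DRIFT":
--         return "HIGH"
--     if t == "METABOLIC_DECAY":
--         return "MEDIUM"
--     return "HIGH" if pred.get("severity", "LOW") == "HIGH" else "MEDIUM"
--
-- def _apply_foresight(predictions: List[Dict[str, Any]]) -> List[Dict[str, Any]]:
--     # stage 1: prune predictions whose type has no corrective action
--     relevant = [p for p in predictions if p.get("type") in _ACTION_OF]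
--     # stage 2: three parallel columns
--     names = [_ACTION_OF[p.get("type")] for p in relevant]
--     prios = [_priority(p) for p in relevant]
--     rats = [p.get("rationale") for p in relevant]
--     # stage 3: assemble
--     return [{"action": a, "priority": pr, "rationale": r}
--             for a, pr, r in zip(names, prios, rats)]
-- ===== Notes on version B (the rewrite author's own statement) =====
-- stated objective: alternative
-- what changed: Replaces A's single accumulator loop with an if/elif ladder by a staged columnar pipeline: first prune unknown types against a data table, then compute three parallel columns (action name, priority, rationale) in separate passes, and finally zip the columns into the action dicts.
import Mathlib
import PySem

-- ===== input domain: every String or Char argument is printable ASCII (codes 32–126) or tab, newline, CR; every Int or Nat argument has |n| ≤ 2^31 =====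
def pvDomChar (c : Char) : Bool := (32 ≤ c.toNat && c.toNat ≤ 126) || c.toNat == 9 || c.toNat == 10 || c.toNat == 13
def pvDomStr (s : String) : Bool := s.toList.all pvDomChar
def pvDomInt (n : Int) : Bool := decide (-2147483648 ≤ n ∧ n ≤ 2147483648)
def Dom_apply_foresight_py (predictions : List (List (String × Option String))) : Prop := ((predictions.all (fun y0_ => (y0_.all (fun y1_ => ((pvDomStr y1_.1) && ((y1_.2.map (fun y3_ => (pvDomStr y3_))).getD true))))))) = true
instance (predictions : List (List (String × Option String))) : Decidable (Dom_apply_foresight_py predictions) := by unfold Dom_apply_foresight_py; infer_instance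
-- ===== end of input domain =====

-- B replaces A's accumulator loop with an if/elif ladder by a staged columnar
-- pipeline: prune against a data table, build three parallel columns, zip them
-- into the action dicts (objective: alternative, same cost).

-- ===== PORT A =====
-- dicts are association lists; Python dict.get = first match
def apply_foresight_py (predictions : List (List (String × Option String))) : List (List (String × Option String)) :=
  predictions.foldl (fun actions pred =>
    let p_type := List.lookup "type" pred
    let severity := (List.lookup "severity" pred).getD (some "LOW")
    if p_type = some (some "COGNITIVE_OVERLOAD") then
      actions ++ [[("action", some "MEMORY_VACUUM"),
                   ("priority", some (if severity = some "HIGH" then "HIGH" else "MEDIUM")),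
                   ("rationale", (List.lookup "rationale" pred).getD none)]]
    else if p_type = some (some "STABILITY_DRIFT") then
      actions ++ [[("action", some "FORCE_SENTINEL_UPGRADE"),
                   ("priority", some "HIGH"),
                   ("rationale", (List.lookup "rationale" pred).getD none)]]
    else if p_type = some (some "METABOLIC_DECAY") then
      actions ++ [[("action", some "METABOLIC_RECALIBRATION"),
                   ("priority", some "MEDIUM"),
                   ("rationale", (List.lookup "rationale" pred).getD none)]]
    else actions) []

-- ===== PORT B =====
-- B's _ACTION_OF data table
def pvActionOf : List (String × String) :=
  [("COGNITIVE_OVERLOAD", "MEMORY_VACUUM"),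
   ("STABILITY_DRIFT", "FORCE_SENTINEL_UPGRADE"),
   ("METABOLIC_DECAY", "METABOLIC_RECALIBRATION")]

-- pred.get("type") : missing key and stored None both give none
def pvTypeOf (pred : List (String × Option String)) : Option String :=
  (List.lookup "type" pred).getD none

def pvPriority (pred : List (String × Option String)) : String :=
  if pvTypeOf pred = some "STABILITY_DRIFT" then "HIGH"
  else if pvTypeOf pred = some "METABOLIC_DECAY" then "MEDIUM"
  else if (List.lookup "severity" pred).getD (some "LOW") = some "HIGH" then "HIGH" else "MEDIUM"

def apply_foresight_py_alt (predictions : List (List (String × Option String))) : List (List (String × Option String)) :=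
  let relevant := predictions.filter (fun p =>
    match pvTypeOf p with
    | some t => (List.lookup t pvActionOf).isSome
    | none => false)
  let names := relevant.map (fun p => ((pvTypeOf p).bind (fun t => List.lookup t pvActionOf)).getD "")
  let prios := relevant.map pvPriority
  let rats := relevant.map (fun p => (List.lookup "rationale" p).getD none)
  (names.zip (prios.zip rats)).map (fun x =>
    [("action", some x.1), ("priority", some x.2.1), ("rationale", x.2.2)])

-- ===== PRECONDITION & SPEC =====
def Spec_apply_foresight_py (predictions : List (List (String × Option String))) (out : List (List (String × Option String))) : Prop := out = apply_foresight_py_alt predictions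
instance (predictions : List (List (String × Option String))) (out : List (List (String × Option String))) : Decidable (Spec_apply_foresight_py predictions out) := by unfold Spec_apply_foresight_py; infer_instance

-- ===== CLAIM (what is proved, stated in full; the proofs are below) =====
def Claim_equal_apply_foresight_py : Prop := ∀ (predictions : List (List (String × Option String))), Dom_apply_foresight_py predictions → Spec_apply_foresight_py predictions (apply_foresight_py predictions)

-- ===== LEMMAS AND PROOFS =====

-- B's pipeline unfolded one element at a time
theorem alt_nil : apply_foresight_py_alt [] = [] := rfl

theorem alt_cons (p : List (String × Option String)) (rest : List (List (String × Option String))) :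
    apply_foresight_py_alt (p :: rest) =
      (match pvTypeOf p with
       | some t =>
         match List.lookup t pvActionOf with
         | some a => [[("action", some a), ("priority", some (pvPriority p)),
                       ("rationale", (List.lookup "rationale" p).getD none)]]
         | none => []
       | none => []) ++ apply_foresight_py_alt rest := by
  rcases h : pvTypeOf p with _ | t
  · simp [apply_foresight_py_alt, h]
  · rcases ha : List.lookup t pvActionOf with _ | a
    · simp [apply_foresight_py_alt, h, ha]
    · simp [apply_foresight_py_alt, h, ha]

theorem apply_foresight_py_foldl (predictions : List (List (String × Option String)))
    (acc : List (List (String × Option String))) :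
    predictions.foldl (fun actions pred =>
      let p_type := List.lookup "type" pred
      let severity := (List.lookup "severity" pred).getD (some "LOW")
      if p_type = some (some "COGNITIVE_OVERLOAD") then
        actions ++ [[("action", some "MEMORY_VACUUM"),
                     ("priority", some (if severity = some "HIGH" then "HIGH" else "MEDIUM")),
                     ("rationale", (List.lookup "rationale" pred).getD none)]]
      else if p_type = some (some "STABILITY_DRIFT") then
        actions ++ [[("action", some "FORCE_SENTINEL_UPGRADE"),
                     ("priority", some "HIGH"),
                     ("rationale", (List.lookup "rationale" pred).getD none)]]
      else if p_type = some (some "METABOLIC_DECAY") then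
        actions ++ [[("action", some "METABOLIC_RECALIBRATION"),
                     ("priority", some "MEDIUM"),
                     ("rationale", (List.lookup "rationale" pred).getD none)]]
      else actions) acc = acc ++ apply_foresight_py_alt predictions := by
  induction predictions generalizing acc with
  | nil => simp [alt_nil]
  | cons pred rest ih =>
    simp only [List.foldl_cons, ih, alt_cons pred rest]
    rcases h : List.lookup "type" pred with _ | (_ | t)
    · simp [pvTypeOf, h]
    · simp [pvTypeOf, h]
    · simp only [pvTypeOf, h, Option.getD_some]
      by_cases h1 : t = "COGNITIVE_OVERLOAD"
      · subst h1
        simp [pvActionOf, pvPriority, pvTypeOf, h]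
      · by_cases h2 : t = "STABILITY_DRIFT"
        · subst h2
          simp [pvActionOf, List.lookup, pvPriority, pvTypeOf, h]
        · by_cases h3 : t = "METABOLIC_DECAY"
          · subst h3
            simp [pvActionOf, List.lookup, pvPriority, pvTypeOf, h]
          · have b1 : (t == "COGNITIVE_OVERLOAD") = false := beq_eq_false_iff_ne.mpr h1
            have b2 : (t == "STABILITY_DRIFT") = false := beq_eq_false_iff_ne.mpr h2
            have b3 : (t == "METABOLIC_DECAY") = false := beq_eq_false_iff_ne.mpr h3
            simp [pvActionOf, List.lookup, h1, h2, h3, b1, b2, b3]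

-- ===== VERDICT (by name: the statement is the Claim_ definition above) =====
theorem apply_foresight_py_spec : Claim_equal_apply_foresight_py := by
  intro predictions _
  show apply_foresight_py predictions = apply_foresight_py_alt predictions
  simpa using apply_foresight_py_foldl predictions []
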